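-- pv_equiv track=rewrite | github.com/crinas21/python_unix_emulator | nautilus.py | find_flags
-- ===== SOURCE A (Python) =====
-- def find_flags(line:list) -> list:
--     '''Returns a list of all flags from the command line'''
--     flags = []
--     i = 0
--     while i < len(line):
--         if line[i][0] == "-" and len(line[i]) > 1:
--             flags.append(line[i])
--             line.remove(line[i])
--         else:
--             break
--     return flags
-- ===== SOURCE B (Python) =====
-- def _leading_flags(args):
--     '''Pure recursive helper: the longest prefix of args consisting of flags.'''
--     if not args or not (args[0][0] == "-" and len(args[0]) > 1):
--         return []
--     return [args[0]] + _leading_flags(args[1:])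
--
-- def find_flags(line: list) -> list:
--     '''Returns a list of all flags from the command line'''
--     flags = _leading_flags(line)
--     del line[:len(flags)]
--     return flags
-- ===== Notes on version B (the rewrite author's own statement) =====
-- stated objective: alternative
-- what changed: B computes the leading-flag prefix with a pure structural recursion on the list and then removes it from line in one bulk slice deletion, instead of A's imperative while-loop that repeatedly tests index 0, appends to an accumulator and removes one element at a time.
-- outside the precondition, e.g. on find_flags(['-a', '']): A raises IndexError, B raises IndexError
import Mathlib
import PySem

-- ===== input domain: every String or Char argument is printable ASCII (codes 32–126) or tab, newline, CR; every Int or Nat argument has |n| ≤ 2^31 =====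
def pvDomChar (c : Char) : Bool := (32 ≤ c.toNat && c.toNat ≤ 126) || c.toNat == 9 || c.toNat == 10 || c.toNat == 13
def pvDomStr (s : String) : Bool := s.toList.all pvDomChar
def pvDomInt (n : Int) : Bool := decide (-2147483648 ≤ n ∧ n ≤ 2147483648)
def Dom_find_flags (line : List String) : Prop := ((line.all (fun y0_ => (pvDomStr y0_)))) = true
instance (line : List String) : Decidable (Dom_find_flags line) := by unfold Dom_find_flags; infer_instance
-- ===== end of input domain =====

-- B computes the leading-flag prefix by a pure structural recursion, then deletes it from
-- `line` in one bulk slice, instead of A's while-loop with an accumulator and element-by-element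
-- list.remove (alternative decomposition). Both Pythons mutate `line` identically (leading
-- flags removed); the equivalence proved here is about the return value.

-- ===== PORT A =====
-- while i < len(line): if line[i][0] == "-" and len(line[i]) > 1: append + remove; else break
-- (i stays 0, removal keeps shifting the list, so the test is always on the front element).
-- line[i][0] on an empty string is an IndexError: PySem.Str.pyGet? returns none there;
-- those inputs are excluded by Pre_find_flags below.
def find_flags_go (flags : List String) : List String → List String
  | [] => flags
  | a :: rest =>
    match PySem.Str.pyGet? a 0 with
    | none => flags
    | some c =>
      if c = '-' ∧ PySem.Str.len a > 1 then
        find_flags_go (flags ++ [a]) rest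
      else
        flags

def find_flags (line : List String) : List String := find_flags_go [] line

-- ===== PORT B =====
-- _leading_flags: if not args or not (args[0][0] == "-" and len(args[0]) > 1): return []
--                 return [args[0]] + _leading_flags(args[1:])
-- args[0][0] on an empty first string is an IndexError (none from pyGet?); the port returns []
-- there, and Pre_find_flags excludes those inputs.
def pvLeadingFlags : List String → List String
  | [] => []
  | a :: rest =>
    if (PySem.Str.pyGet? a 0 == some '-') && (PySem.Str.len a > 1) then
      [a] ++ pvLeadingFlags rest
    else
      []

def find_flags_alt (line : List String) : List String := pvLeadingFlags line

-- ===== PRECONDITION & SPEC =====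
-- Pre_ excludes exactly the inputs on which the Python raises IndexError from arg[0]:
-- those where an empty string is the first element after the leading-flag prefix.
def Pre_find_flags (line : List String) : Prop :=
  (line.dropWhile (fun a => a.toList.head? = some '-' ∧ a.toList.length > 1)).head? ≠ some ""
instance (line : List String) : Decidable (Pre_find_flags line) := by
  unfold Pre_find_flags; infer_instance

def pvWitness_find_flags : List String := ["-a", "--long", "file", ""]

def Spec_find_flags (line : List String) (out : List String) : Prop := out = find_flags_alt line
instance (line : List String) (out : List String) : Decidable (Spec_find_flags line out) := by unfold Spec_find_flags; infer_instance

-- ===== CLAIM =====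
def Claim_equal_find_flags : Prop := ∀ (line : List String), Dom_find_flags line → Pre_find_flags line → Spec_find_flags line (find_flags line)

-- ===== LEMMAS AND PROOFS =====
theorem find_flags_go_eq (line : List String) :
    ∀ flags, find_flags_go flags line = flags ++ pvLeadingFlags line := by
  induction line with
  | nil => intro flags; simp [find_flags_go, pvLeadingFlags]
  | cons a rest ih =>
    intro flags
    simp only [find_flags_go, pvLeadingFlags]
    cases h : PySem.Str.pyGet? a 0 with
    | none => simp [h]
    | some c =>
      by_cases hc : c = '-' ∧ 1 < a.length
      · simp [h, hc, ih, List.append_assoc]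
      · simp only [PySem.Str.len_eq, gt_iff_lt]
        simp [h, hc]

-- ===== VERDICT =====
theorem find_flags_spec : Claim_equal_find_flags := by
  intro line _ _
  show find_flags line = find_flags_alt line
  simp [find_flags, find_flags_alt, find_flags_go_eq]
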